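-- pv_equiv track=rewrite | github.com/ajgbarnes/level9 | common-words.py | checkAtomicWord
-- ===== SOURCE A (Python) =====
-- def checkAtomicWord(data, address):
--
--     startAddress = address
--     atomicWord = True
--     myByte = data[address]
--     while(myByte):
--         if(myByte == 0x01 or myByte == 0x02):
--             break
--         elif(myByte >=94):
--             atomicWord = False
--         address = address+1
--         myByte = data[address]
--
--     if(address == startAddress):
--         atomicWord = False
--
--     return atomicWord, address
-- ===== SOURCE B (Python) =====
-- def checkAtomicWord(data, address):
--     # Pass 1: locate the word boundary (first terminator byte 0/1/2).
--     end = address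
--     while data[end] not in (0, 1, 2):
--         end += 1
--     # Pass 2: classify the located range independently.
--     atomicWord = end > address and all(data[i] < 94 for i in range(address, end))
--     return atomicWord, end
-- ===== Notes on version B (the rewrite author's own statement) =====
-- stated objective: simpler
-- what changed: B splits A's single interleaved loop into two independent passes: a boundary scan that only finds the terminator, then a separate all(<94) classification over the located range, replacing A's carried flag and post-hoc start-address fixup.
import Mathlib
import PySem

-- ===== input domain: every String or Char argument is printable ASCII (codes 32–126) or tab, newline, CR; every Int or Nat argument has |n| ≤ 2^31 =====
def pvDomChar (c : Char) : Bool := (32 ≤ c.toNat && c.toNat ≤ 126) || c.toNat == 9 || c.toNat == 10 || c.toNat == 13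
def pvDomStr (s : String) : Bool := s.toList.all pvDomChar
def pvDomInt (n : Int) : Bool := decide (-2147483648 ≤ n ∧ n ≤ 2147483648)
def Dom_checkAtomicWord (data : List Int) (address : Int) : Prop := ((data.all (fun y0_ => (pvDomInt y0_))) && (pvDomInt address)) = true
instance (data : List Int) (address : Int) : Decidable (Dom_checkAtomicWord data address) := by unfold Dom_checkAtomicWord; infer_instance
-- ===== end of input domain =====

-- B replaces A's single loop (carried flag + post fixup) by a boundary scan followed by an
-- independent all(<94) pass over the located range; equivalence of the return value is proved.

-- ===== PORT A =====
-- the while loop: read data[address]; stop on byte 0 (falsy) or 1/2 (break); otherwise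
-- classify (>=94 clears the flag) and advance.  Fuel bounds the iteration count; inside
-- Pre_ the loop always stops before the fuel runs out (the `none` branch is Python's
-- IndexError, excluded by Pre_).
def pvAwLoop (data : List Int) (fuel : Nat) (atomicWord : Bool) (address : Int) : Bool × Int :=
  match fuel with
  | 0 => (atomicWord, address)
  | fuel + 1 =>
    match PySem.List.pyGet? data address with
    | none => (atomicWord, address)
    | some myByte =>
      if myByte = 0 then (atomicWord, address)
      else if myByte = 1 ∨ myByte = 2 then (atomicWord, address)
      else pvAwLoop data fuel (if 94 ≤ myByte then false else atomicWord) (address + 1)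

def checkAtomicWord (data : List Int) (address : Int) : Bool × Int :=
  let startAddress := address
  let r := pvAwLoop data (data.length + address.natAbs + 1) true address
  let atomicWord := if r.2 = startAddress then false else r.1
  (atomicWord, r.2)

-- ===== PORT B =====
-- pass 1: find the first terminator byte (0/1/2) at or after `address`
def pvFindEnd (data : List Int) (fuel : Nat) (endAddr : Int) : Int :=
  match fuel with
  | 0 => endAddr
  | fuel + 1 =>
    match PySem.List.pyGet? data endAddr with
    | none => endAddr
    | some b => if b = 0 ∨ b = 1 ∨ b = 2 then endAddr else pvFindEnd data fuel (endAddr + 1)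

def checkAtomicWord_alt (data : List Int) (address : Int) : Bool × Int :=
  let e := pvFindEnd data (data.length + address.natAbs + 1) address
  -- pass 2: end > address and all(data[i] < 94 for i in range(address, end))
  let atomicWord := decide (address < e) &&
    (PySem.List.pyRange address e 1).all (fun i => decide ((PySem.List.pyGet? data i).getD 0 < 94))
  (atomicWord, e)

-- ===== PRECONDITION & SPEC =====
-- Pre_ holds exactly where Python A returns: the initial data[address] lookup succeeds and a
-- terminator byte 0/1/2 is reachable by the forward scan (for a negative start the scan wraps
-- to the end once and then sweeps the whole list, so any terminator in data suffices).
def Pre_checkAtomicWord (data : List Int) (address : Int) : Prop :=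
  if address < 0 then
    -address ≤ (data.length : Int) ∧ ∃ x ∈ data, x = 0 ∨ x = 1 ∨ x = 2
  else
    address < (data.length : Int) ∧ ∃ x ∈ data.drop address.toNat, x = 0 ∨ x = 1 ∨ x = 2
instance (data : List Int) (address : Int) : Decidable (Pre_checkAtomicWord data address) := by
  unfold Pre_checkAtomicWord; infer_instance

def pvWitness_checkAtomicWord : List Int × Int := ([65, 120, 1], 0)

def Spec_checkAtomicWord (data : List Int) (address : Int) (out : Bool × Int) : Prop := out = checkAtomicWord_alt data address
instance (data : List Int) (address : Int) (out : Bool × Int) : Decidable (Spec_checkAtomicWord data address out) := by unfold Spec_checkAtomicWord; infer_instance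

-- ===== CLAIM (what is proved, stated in full; the proofs are below) =====
def Claim_equal_checkAtomicWord : Prop := ∀ (data : List Int) (address : Int), Dom_checkAtomicWord data address → Pre_checkAtomicWord data address → Spec_checkAtomicWord data address (checkAtomicWord data address)

-- ===== LEMMAS AND PROOFS =====

lemma le_pvFindEnd (data : List Int) : ∀ (fuel : Nat) (a : Int), a ≤ pvFindEnd data fuel a := by
  intro fuel
  induction fuel with
  | zero => intro a; simp [pvFindEnd]
  | succ n ih =>
    intro a
    simp only [pvFindEnd]
    cases PySem.List.pyGet? data a with
    | none => exact le_refl a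
    | some b =>
      by_cases hb : b = 0 ∨ b = 1 ∨ b = 2
      · simp [hb]
      · simp only [hb, if_false]
        have := ih (a + 1); omega

-- the interleaved loop of A computes the boundary of B's pass 1 and, as its flag, the
-- conjunction of the initial flag with B's pass-2 predicate over the scanned range
lemma pvAwLoop_eq (data : List Int) : ∀ (fuel : Nat) (atomic : Bool) (a : Int),
    pvAwLoop data fuel atomic a =
      (atomic && (PySem.List.pyRange a (pvFindEnd data fuel a) 1).all
          (fun i => decide ((PySem.List.pyGet? data i).getD 0 < 94)),
        pvFindEnd data fuel a) := by
  intro fuel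
  induction fuel with
  | zero =>
    intro atomic a
    simp [pvAwLoop, pvFindEnd, PySem.List.pyRange_one_eq_nil (le_refl a)]
  | succ n ih =>
    intro atomic a
    simp only [pvAwLoop, pvFindEnd]
    cases hg : PySem.List.pyGet? data a with
    | none => simp [PySem.List.pyRange_one_eq_nil (le_refl a)]
    | some b =>
      by_cases h0 : b = 0
      · simp [h0, PySem.List.pyRange_one_eq_nil (le_refl a)]
      by_cases h12 : b = 1 ∨ b = 2
      · simp [h0, h12, PySem.List.pyRange_one_eq_nil (le_refl a)]
      simp only [h0, h12, or_self, if_false]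
      rw [ih]
      have hle : a + 1 ≤ pvFindEnd data n (a + 1) := le_pvFindEnd data n (a + 1)
      have hlt : a < pvFindEnd data n (a + 1) := by omega
      rw [PySem.List.pyRange_one_cons hlt]
      simp only [List.all_cons, hg]
      by_cases h94 : 94 ≤ b
      · have : ¬ b < 94 := by omega
        simp [h94, this]
      · have : b < 94 := by omega
        simp [h94, this]

-- ===== VERDICT (by name: the statement is the Claim_ definition above) =====
theorem checkAtomicWord_spec : Claim_equal_checkAtomicWord := by
  intro data address _ _
  unfold Spec_checkAtomicWord checkAtomicWord checkAtomicWord_alt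
  rw [pvAwLoop_eq]
  set e := pvFindEnd data (data.length + address.natAbs + 1) address with he
  have hle : address ≤ e := le_pvFindEnd data _ address
  by_cases h : e = address
  · simp [h, PySem.List.pyRange_one_eq_nil (le_refl address)]
  · have hlt : address < e := by omega
    simp [h, hlt]
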